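-- pv_equiv track=rewrite | github.com/axaysushir/Algorithms-DataStructure | kClosestElement.py | closest_nums
-- ===== SOURCE A (Python) =====
-- def closest_nums(nums, k, x):
--     new_i = 0
--     minDiff = 0
--     for i in range(k):
--         minDiff += abs(nums[i] - x)
--
--     prevDiff = minDiff
--     for i in range(1, len(nums) - k + 1):
--         # substract old window start
--         newDiff = prevDiff - abs(nums[i-1] - x)
--
--         # Add the new window
--         newDiff += abs(nums[i+k-1] - x)
--         if newDiff < minDiff:
--             minDiff = newDiff
--             new_i = i
--
--         prevDiff = newDiff
--
--     return nums[new_i: new_i + k]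
-- ===== SOURCE B (Python) =====
-- def closest_nums(nums, k, x):
--     # prefix sums of absolute differences; window sum = prefix[i+k] - prefix[i]
--     diffs = [abs(v - x) for v in nums]
--     prefix = [0]
--     total = 0
--     for d in diffs:
--         total += d
--         prefix.append(total)
--     best_i = 0
--     for i in range(1, len(nums) - k + 1):
--         if prefix[i + k] - prefix[i] < prefix[best_i + k] - prefix[best_i]:
--             best_i = i
--     return nums[best_i: best_i + k]
-- ===== Notes on version B (the rewrite author's own statement) =====
-- stated objective: alternative
-- what changed: B precomputes a prefix-sum array of absolute differences in one pass and then picks the start index minimizing prefix[i+k]-prefix[i], instead of A's incremental sliding-window running-sum update; strict < keeps the earliest index like A.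
import Mathlib
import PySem

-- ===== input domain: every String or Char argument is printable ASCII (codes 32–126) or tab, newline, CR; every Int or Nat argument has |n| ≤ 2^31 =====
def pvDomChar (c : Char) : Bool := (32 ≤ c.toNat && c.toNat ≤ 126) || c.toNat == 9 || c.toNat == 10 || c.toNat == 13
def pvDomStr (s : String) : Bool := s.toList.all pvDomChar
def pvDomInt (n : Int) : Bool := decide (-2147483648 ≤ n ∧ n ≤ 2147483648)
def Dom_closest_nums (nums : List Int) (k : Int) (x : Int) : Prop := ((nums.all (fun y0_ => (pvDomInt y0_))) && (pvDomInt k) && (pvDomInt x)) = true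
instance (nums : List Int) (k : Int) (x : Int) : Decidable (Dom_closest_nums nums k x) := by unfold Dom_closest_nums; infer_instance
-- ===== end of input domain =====

-- B replaces A's incremental sliding-window running sum by a precomputed prefix-sum array of
-- absolute differences, picking the start index minimizing prefix[i+k]-prefix[i]
-- (objective: alternative decomposition, same results).

-- ===== PORT A =====
-- abs(nums[i] - x)  (pyGetD is exact for the in-range indices Pre_ admits)
def pvAbsAt (nums : List Int) (x i : Int) : Int := |PySem.List.pyGetD nums i 0 - x|

-- loop body of A's second loop: state (new_i, minDiff, prevDiff)
def pvStepA (nums : List Int) (k x : Int) (st : Int × Int × Int) (i : Int) : Int × Int × Int :=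
  let newDiff := st.2.2 - pvAbsAt nums x (i - 1) + pvAbsAt nums x (i + k - 1)
  if newDiff < st.2.1 then (i, newDiff, newDiff) else (st.1, st.2.1, newDiff)

def closest_nums (nums : List Int) (k : Int) (x : Int) : List Int :=
  let minDiff := (PySem.List.pyRange 0 k 1).foldl (fun acc i => acc + pvAbsAt nums x i) 0
  let st := (PySem.List.pyRange 1 ((nums.length : Int) - k + 1) 1).foldl
      (pvStepA nums k x) (0, minDiff, minDiff)
  PySem.List.slice nums st.1 (st.1 + k)

-- ===== PORT B =====
-- 'total += d; prefix.append(total)'  - the state is (prefix, total)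
def pvPrefStep (st : List Int × Int) (d : Int) : List Int × Int :=
  (st.1 ++ [st.2 + d], st.2 + d)

-- 'if prefix[i+k]-prefix[i] < prefix[best_i+k]-prefix[best_i]: best_i = i'
def pvBestStep (pfx : List Int) (k : Int) (bi i : Int) : Int :=
  if PySem.List.pyGetD pfx (i + k) 0 - PySem.List.pyGetD pfx i 0
       < PySem.List.pyGetD pfx (bi + k) 0 - PySem.List.pyGetD pfx bi 0
  then i else bi

def closest_nums_alt (nums : List Int) (k : Int) (x : Int) : List Int :=
  let diffs := nums.map (fun v => |v - x|)
  let pfx := (diffs.foldl pvPrefStep ([0], 0)).1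
  let best := (PySem.List.pyRange 1 ((nums.length : Int) - k + 1) 1).foldl (pvBestStep pfx k) 0
  PySem.List.slice nums best (best + k)

-- ===== PRECONDITION & SPEC =====
-- Pre_ excludes exactly the inputs where the Python A raises IndexError: k < 0 or k > len(nums).
def Pre_closest_nums (nums : List Int) (k : Int) (x : Int) : Prop :=
  0 ≤ k ∧ k ≤ (nums.length : Int)
instance (nums : List Int) (k : Int) (x : Int) : Decidable (Pre_closest_nums nums k x) := by unfold Pre_closest_nums; infer_instance

def pvWitness_closest_nums : List Int × Int × Int := ([3, 1, 2, 5], 2, 4)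

def Spec_closest_nums (nums : List Int) (k : Int) (x : Int) (out : List Int) : Prop := out = closest_nums_alt nums k x
instance (nums : List Int) (k : Int) (x : Int) (out : List Int) : Decidable (Spec_closest_nums nums k x out) := by unfold Spec_closest_nums; infer_instance

-- ===== CLAIM (what is proved, stated in full; the proofs are below) =====
def Claim_equal_closest_nums : Prop := ∀ (nums : List Int) (k : Int) (x : Int), Dom_closest_nums nums k x → Pre_closest_nums nums k x → Spec_closest_nums nums k x (closest_nums nums k x)


-- ===== LEMMAS AND PROOFS =====

-- proof-side window sum over a Nat-length window starting at Int index i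
def pvS (nums : List Int) (x i : Int) (m : Nat) : Int :=
  (List.range m).foldl (fun acc (j : Nat) => acc + pvAbsAt nums x (i + (j : Int))) 0

theorem pvS_succ (nums : List Int) (x i : Int) (m : Nat) :
    pvS nums x i (m + 1) = pvS nums x i m + pvAbsAt nums x (i + (m : Int)) := by
  simp [pvS, List.range_succ]

-- telescoping: shifting the window by one exchanges the leaving and entering elements
theorem pvS_shift (nums : List Int) (x : Int) (m : Nat) (i : Int) :
    pvS nums x i m + pvAbsAt nums x (i - 1) = pvS nums x (i - 1) m + pvAbsAt nums x (i + (m : Int) - 1) := by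
  induction m generalizing i with
  | zero => simp [pvS]
  | succ m ih =>
    rw [pvS_succ, pvS_succ]
    have h := ih i
    push_cast
    have h2 : i - 1 + (m : Int) = i + (m : Int) - 1 := by ring
    have h3 : i + ((m : Int) + 1) - 1 = i + (m : Int) := by ring
    rw [h2, h3]
    omega

-- the first loop of A computes pvS at start index 0
theorem pvFirst_eq (nums : List Int) (x k : Int) :
    (PySem.List.pyRange 0 k 1).foldl (fun acc i => acc + pvAbsAt nums x i) 0 = pvS nums x 0 k.toNat := by
  unfold pvS
  rw [PySem.List.pyRange_one, List.foldl_map]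
  simp only [Int.sub_zero]

-- A's incremental update = the shifted window's sum
theorem pvS_step (nums : List Int) (x k i : Int) (hk : 0 ≤ k) :
    pvS nums x (i - 1) k.toNat - pvAbsAt nums x (i - 1) + pvAbsAt nums x (i + k - 1)
      = pvS nums x i k.toNat := by
  have h := pvS_shift nums x k.toNat i
  have hc : (k.toNat : Int) = k := Int.toNat_of_nonneg hk
  rw [hc] at h
  omega

-- scanl always starts with its seed
theorem pvScanl_head (f : Int → Int → Int) (t : Int) (ds : List Int) :
    List.scanl f t ds = t :: (List.scanl f t ds).tail := by
  cases ds with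
  | nil => rw [List.scanl_nil]; rfl
  | cons d ds => rw [List.scanl_cons]; rfl

-- B's prefix-building fold produces scanl of the running sums
theorem pvPref_scanl : ∀ (ds P : List Int) (t : Int),
    (ds.foldl pvPrefStep (P, t)).1 = P ++ (List.scanl (· + ·) t ds).tail := by
  intro ds
  induction ds with
  | nil => intro P t; rw [List.foldl_nil, List.scanl_nil]; simp
  | cons d ds ih =>
    intro P t
    simp only [List.foldl_cons, pvPrefStep]
    rw [ih, List.scanl_cons, List.tail_cons, pvScanl_head (· + ·) (t + d) ds]
    simp

-- entries of the scanl are partial sums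
theorem pvScanl_getD : ∀ (ds : List Int) (t : Int) (m : Nat), m ≤ ds.length →
    (List.scanl (· + ·) t ds).getD m 0 = t + (ds.take m).sum := by
  intro ds
  induction ds with
  | nil =>
    intro t m hm
    have : m = 0 := by simpa using hm
    subst this
    rw [List.scanl_nil]; simp
  | cons d ds ih =>
    intro t m hm
    cases m with
    | zero => rw [List.scanl_cons]; simp
    | succ j =>
      rw [List.scanl_cons]
      simp only [List.getD_cons_succ, List.take_succ_cons, List.sum_cons]
      rw [ih (t + d) j (by simpa using hm)]
      ring

-- the window sum as a difference of partial sums of diffs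
theorem pvS_take (nums : List Int) (x : Int) : ∀ (m : Nat) (i : Int), 0 ≤ i →
    i.toNat + m ≤ nums.length →
    pvS nums x i m = ((nums.map fun v => |v - x|).take (i.toNat + m)).sum
        - ((nums.map fun v => |v - x|).take i.toNat).sum := by
  intro m
  induction m with
  | zero => intro i hi hlen; simp [pvS]
  | succ m ih =>
    intro i hi hlen
    rw [pvS_succ]
    rw [ih i hi (by omega)]
    have hp : i.toNat + m < (nums.map fun v => |v - x|).length := by
      simpa using (by omega : i.toNat + m < nums.length)
    have hs := List.sum_take_succ (nums.map fun v => |v - x|) (i.toNat + m) hp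
    have he : (nums.map fun v => |v - x|)[i.toNat + m] = |nums[i.toNat + m]'(by omega) - x| := by
      simp
    have ha : pvAbsAt nums x (i + (m : Int)) = |nums[i.toNat + m]'(by omega) - x| := by
      unfold pvAbsAt
      rw [PySem.List.pyGetD_eq_getElem nums 0 (by omega) (by omega)]
      have hidx : (i + (m : Int)).toNat = i.toNat + m := by omega
      simp only [hidx]
    rw [show i.toNat + (m + 1) = (i.toNat + m) + 1 by omega, hs, he, ha]
    ring

-- B's comparison value prefix[i+k]-prefix[i] equals the window sum, for in-range i
theorem pvWin_eq (nums : List Int) (k x i : Int) (hk : 0 ≤ k) (hi : 0 ≤ i)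
    (hin : i + k ≤ (nums.length : Int)) :
    PySem.List.pyGetD ((nums.map fun v => |v - x|).foldl pvPrefStep ([0], 0)).1 (i + k) 0
      - PySem.List.pyGetD ((nums.map fun v => |v - x|).foldl pvPrefStep ([0], 0)).1 i 0
      = pvS nums x i k.toNat := by
  have hpfx : ((nums.map fun v => |v - x|).foldl pvPrefStep ([0], 0)).1
      = List.scanl (· + ·) 0 (nums.map fun v => |v - x|) := by
    rw [pvPref_scanl]
    conv_rhs => rw [pvScanl_head (· + ·) 0 (nums.map fun v => |v - x|)]
    rfl
  have hik : ((i + k).toNat : Int) = i + k := Int.toNat_of_nonneg (by omega)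
  have hii : (i.toNat : Int) = i := Int.toNat_of_nonneg hi
  have h1 : PySem.List.pyGetD (List.scanl (· + ·) 0 (nums.map fun v => |v - x|)) (i + k) 0
      = ((nums.map fun v => |v - x|).take (i.toNat + k.toNat)).sum := by
    rw [← hik, PySem.List.pyGetD_natCast,
      pvScanl_getD _ _ _ (by simp only [List.length_map]; omega)]
    rw [show (i + k).toNat = i.toNat + k.toNat by omega]
    simp
  have h2 : PySem.List.pyGetD (List.scanl (· + ·) 0 (nums.map fun v => |v - x|)) i 0
      = ((nums.map fun v => |v - x|).take i.toNat).sum := by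
    rw [← hii, PySem.List.pyGetD_natCast,
      pvScanl_getD _ _ _ (by simp only [List.length_map]; omega)]
    simp only [Int.toNat_natCast, zero_add]
  rw [hpfx, h1, h2, pvS_take nums x k.toNat i hi (by omega)]

-- main loop invariant: A's fold state is (ni, pvS ni, pvS (s-1)); B's fold tracks ni
theorem pvLoop_eq (nums : List Int) (k x : Int) (hk : 0 ≤ k) :
    ∀ (c : Nat) (s ni : Int), 1 ≤ s → 0 ≤ ni → ni + k ≤ (nums.length : Int) →
      (((nums.length : Int) - k + 1) - s).toNat = c →
      ((PySem.List.pyRange s ((nums.length : Int) - k + 1) 1).foldl (pvStepA nums k x)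
          (ni, pvS nums x ni k.toNat, pvS nums x (s - 1) k.toNat)).1
        = (PySem.List.pyRange s ((nums.length : Int) - k + 1) 1).foldl
            (pvBestStep ((nums.map fun v => |v - x|).foldl pvPrefStep ([0], 0)).1 k) ni := by
  intro c
  induction c with
  | zero =>
    intro s ni hs hni hnik hc
    have hMs : (nums.length : Int) - k + 1 ≤ s := by omega
    rw [PySem.List.pyRange_one_eq_nil hMs]
    simp
  | succ c ih =>
    intro s ni hs hni hnik hc
    have hsM : s < (nums.length : Int) - k + 1 := by omega
    rw [PySem.List.pyRange_one_cons hsM]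
    simp only [List.foldl_cons]
    have hstepA : pvStepA nums k x (ni, pvS nums x ni k.toNat, pvS nums x (s - 1) k.toNat) s
        = (if pvS nums x s k.toNat < pvS nums x ni k.toNat
           then (s, pvS nums x s k.toNat, pvS nums x s k.toNat)
           else (ni, pvS nums x ni k.toNat, pvS nums x s k.toNat)) := by
      simp only [pvStepA, pvS_step nums x k s hk]
    have hstepB : pvBestStep ((nums.map fun v => |v - x|).foldl pvPrefStep ([0], 0)).1 k ni s
        = (if pvS nums x s k.toNat < pvS nums x ni k.toNat then s else ni) := by
      unfold pvBestStep
      rw [pvWin_eq nums k x s hk (by omega) (by omega),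
        pvWin_eq nums k x ni hk hni hnik]
    rw [hstepA, hstepB]
    split_ifs with hlt
    · have h := ih (s + 1) s (by omega) (by omega) (by omega) (by omega)
      rw [show s + 1 - 1 = s from by ring] at h
      exact h
    · have h := ih (s + 1) ni (by omega) hni hnik (by omega)
      rw [show s + 1 - 1 = s from by ring] at h
      exact h

-- ===== VERDICT (by name: the statements are the Claim_ definitions above) =====
theorem closest_nums_spec : Claim_equal_closest_nums := by
  intro nums k x _ hpre
  obtain ⟨hk, hkn⟩ := hpre
  unfold Spec_closest_nums closest_nums closest_nums_alt
  simp only [pvFirst_eq nums x k]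
  have h := pvLoop_eq nums k x hk ((((nums.length : Int) - k + 1) - 1).toNat) 1 0
      (by omega) (by omega) (by omega) rfl
  simp only [show (1 : Int) - 1 = 0 from rfl] at h
  simp only [h]
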